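-- pv_equiv track=rewrite | github.com/Senyu-T/ML-algorithms-with-numpy | decisionTree.py | getSubData
-- ===== SOURCE A (Python) =====
-- def getSubData(attributeIndex, data, classes):
--     attDict = {}
--     countDict = {}
--     attCount = len(data[0]) - 1
--     for instance in data:
--         thisAtt = instance[attributeIndex]
--         thisLab = instance[attCount]
--         if thisAtt not in attDict:
--             attDict[thisAtt] = {}
--             attDict[thisAtt][classes[0]] = 0
--             attDict[thisAtt][classes[1]] = 0
--             attDict[thisAtt][thisLab] = 1
--             countDict[thisAtt] = 1
--         else:
--             countDict[thisAtt] += 1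
--             if thisLab not in attDict[thisAtt]:
--                 attDict[thisAtt][thisLab] = 1
--             else:
--                 attDict[thisAtt][thisLab] += 1
--     return attDict, countDict
-- ===== SOURCE B (Python) =====
-- def getSubData(attributeIndex, data, classes):
--     # Two-phase: group labels per attribute value, then reshape into count dicts.
--     attCount = len(data[0]) - 1
--     groups = {}
--     for instance in data:
--         groups.setdefault(instance[attributeIndex], []).append(instance[attCount])
--     attDict = {}
--     countDict = {}
--     for att, labels in groups.items():
--         d = {classes[0]: 0, classes[1]: 0}
--         for lab in labels:
--             d[lab] = d.get(lab, 0) + 1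
--         attDict[att] = d
--         countDict[att] = len(labels)
--     return attDict, countDict
-- ===== Notes on version B (the rewrite author's own statement) =====
-- stated objective: alternative
-- what changed: A builds both nested count dicts incrementally in one interleaved pass with an explicit new-key/seen-key branch; B first groups each row's label under its attribute value in one pass, then in a second pass reshapes each group into the seeded per-class count dict and its size.
import Mathlib
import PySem

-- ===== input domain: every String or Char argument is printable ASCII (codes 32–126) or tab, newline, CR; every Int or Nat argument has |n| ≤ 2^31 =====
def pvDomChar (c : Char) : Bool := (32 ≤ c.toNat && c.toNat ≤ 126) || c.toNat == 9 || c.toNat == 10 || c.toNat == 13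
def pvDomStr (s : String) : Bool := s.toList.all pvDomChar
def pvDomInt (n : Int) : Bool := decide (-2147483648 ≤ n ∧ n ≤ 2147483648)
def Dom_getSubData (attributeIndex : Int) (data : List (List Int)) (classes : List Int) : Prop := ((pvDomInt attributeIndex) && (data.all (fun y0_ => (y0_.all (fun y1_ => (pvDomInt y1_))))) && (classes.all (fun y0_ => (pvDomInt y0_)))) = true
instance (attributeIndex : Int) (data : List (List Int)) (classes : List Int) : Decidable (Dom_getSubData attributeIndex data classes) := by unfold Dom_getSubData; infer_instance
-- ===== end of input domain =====

-- B groups labels per attribute value in one pass and then reshapes each group into the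
-- seeded count dict and its size, instead of A's single interleaved new-key/seen-key loop.

-- ===== PORT A =====
-- one step of A's loop body (state = (attDict, countDict), processed row by row)
def pvStepA (attributeIndex attCount : Int) (classes : List Int)
    (st : PySem.Dict Int (PySem.Dict Int Int) × PySem.Dict Int Int) (inst : List Int) :
    PySem.Dict Int (PySem.Dict Int Int) × PySem.Dict Int Int :=
  let attDict := st.1
  let countDict := st.2
  let thisAtt := PySem.List.pyGetD inst attributeIndex 0
  let thisLab := PySem.List.pyGetD inst attCount 0
  if attDict.contains thisAtt = false then
    let inner := (((PySem.Dict.empty.insert (PySem.List.pyGetD classes 0 0) 0).insert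
        (PySem.List.pyGetD classes 1 0) 0).insert thisLab 1)
    (attDict.insert thisAtt inner, countDict.insert thisAtt 1)
  else
    let countDict' := countDict.insert thisAtt (countDict.getD thisAtt 0 + 1)
    let d := attDict.getD thisAtt PySem.Dict.empty
    let d' := if d.contains thisLab = false then d.insert thisLab 1
              else d.insert thisLab (d.getD thisLab 0 + 1)
    (attDict.insert thisAtt d', countDict')

def getSubData (attributeIndex : Int) (data : List (List Int)) (classes : List Int) :
    (List (Int × List (Int × Int))) × (List (Int × Int)) :=
  let attCount := PySem.List.len (PySem.List.pyGetD data 0 []) - 1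
  let st := data.foldl (pvStepA attributeIndex attCount classes) (PySem.Dict.empty, PySem.Dict.empty)
  (st.1.items.map (fun p => (p.1, p.2.items)), st.2.items)

-- ===== PORT B =====
-- d = {classes[0]: 0, classes[1]: 0}; then d[lab] = d.get(lab, 0) + 1 for each lab
def pvCountLabels (classes : List Int) (labels : List Int) : PySem.Dict Int Int :=
  labels.foldl (fun d lab => d.insert lab (d.getD lab 0 + 1))
    ((PySem.Dict.empty.insert (PySem.List.pyGetD classes 0 0) 0).insert (PySem.List.pyGetD classes 1 0) 0)

def getSubData_alt (attributeIndex : Int) (data : List (List Int)) (classes : List Int) :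
    (List (Int × List (Int × Int))) × (List (Int × Int)) :=
  let attCount := PySem.List.len (PySem.List.pyGetD data 0 []) - 1
  -- phase 1: groups.setdefault(instance[attributeIndex], []).append(instance[attCount])
  let groups := data.foldl
    (fun (g : PySem.Dict Int (List Int)) inst =>
      g.insert (PySem.List.pyGetD inst attributeIndex 0)
        (g.getD (PySem.List.pyGetD inst attributeIndex 0) [] ++ [PySem.List.pyGetD inst attCount 0]))
    PySem.Dict.empty
  -- phase 2: for att, labels in groups.items(): build d, fill attDict and countDict
  let st := groups.items.foldl
    (fun (st : PySem.Dict Int (PySem.Dict Int Int) × PySem.Dict Int Int) p =>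
      (st.1.insert p.1 (pvCountLabels classes p.2), st.2.insert p.1 (PySem.List.len p.2)))
    (PySem.Dict.empty, PySem.Dict.empty)
  (st.1.items.map (fun p => (p.1, p.2.items)), st.2.items)

-- ===== PRECONDITION & SPEC =====
-- exactly where the Python A returns: data nonempty, classes[1] exists, and both row
-- indices (attributeIndex and len(data[0])-1) are in range for every row
def Pre_getSubData (attributeIndex : Int) (data : List (List Int)) (classes : List Int) : Prop :=
  data ≠ [] ∧ 2 ≤ classes.length ∧
  ∀ row ∈ data, PySem.Raise.InRange row.length attributeIndex ∧
    PySem.Raise.InRange row.length ((data.headD []).length - 1)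
instance (attributeIndex : Int) (data : List (List Int)) (classes : List Int) : Decidable (Pre_getSubData attributeIndex data classes) := by unfold Pre_getSubData; infer_instance

def pvWitness_getSubData : Int × List (List Int) × List Int := (0, [[1, 0], [2, 1], [1, 1]], [0, 1])

def Spec_getSubData (attributeIndex : Int) (data : List (List Int)) (classes : List Int) (out : (List (Int × List (Int × Int))) × (List (Int × Int))) : Prop := out = getSubData_alt attributeIndex data classes
instance (attributeIndex : Int) (data : List (List Int)) (classes : List Int) (out : (List (Int × List (Int × Int))) × (List (Int × Int))) : Decidable (Spec_getSubData attributeIndex data classes out) := by unfold Spec_getSubData; infer_instance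

-- ===== CLAIM (what is proved, stated in full; the proofs are below) =====
def Claim_equal_getSubData : Prop := ∀ (attributeIndex : Int) (data : List (List Int)) (classes : List Int), Dom_getSubData attributeIndex data classes → Pre_getSubData attributeIndex data classes → Spec_getSubData attributeIndex data classes (getSubData attributeIndex data classes)

-- ===== LEMMAS AND PROOFS =====

-- the reshaping that phase 2 of B performs, as maps over the group dict's items
def pvReshape (classes : List Int) (g : PySem.Dict Int (List Int)) : PySem.Dict Int (PySem.Dict Int Int) :=
  PySem.Dict.mk (g.items.map (fun p => (p.1, pvCountLabels classes p.2)))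

def pvCnt (g : PySem.Dict Int (List Int)) : PySem.Dict Int Int :=
  PySem.Dict.mk (g.items.map (fun p => (p.1, PySem.List.len p.2)))

-- lookup through a value-mapped item list
theorem pv_get?_mapVals {α β : Type} (f : α → β) (items : List (Int × α)) (k : Int) :
    (PySem.Dict.mk (items.map (fun p => (p.1, f p.2)))).get? k
      = ((PySem.Dict.mk items).get? k).map f := by
  induction items with
  | nil => rfl
  | cons p rest ih =>
      obtain ⟨k1, v1⟩ := p
      simp only [List.map_cons, PySem.Dict.get?_mk_cons]
      by_cases h : (k1 == k) = true
      · rw [if_pos h, if_pos h]; rfl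
      · rw [if_neg h, if_neg h]; exact ih

theorem pv_contains_mapVals {α β : Type} (f : α → β) (g : PySem.Dict Int α) (k : Int) :
    (PySem.Dict.mk (g.items.map (fun p => (p.1, f p.2)))).contains k = g.contains k := by
  rw [PySem.Dict.contains_eq_isSome_get?, PySem.Dict.contains_eq_isSome_get?]
  cases g with
  | mk items => rw [pv_get?_mapVals]; cases (PySem.Dict.mk items).get? k <;> simp

-- the seed dict {classes[0]: 0, classes[1]: 0} only holds zeros
theorem pv_seed_getD (classes : List Int) (lab : Int) :
    ((PySem.Dict.empty.insert (PySem.List.pyGetD classes 0 0) (0 : Int)).insert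
        (PySem.List.pyGetD classes 1 0) 0).getD lab 0 = 0 := by
  rw [PySem.Dict.getD_insert, PySem.Dict.getD_insert]
  split_ifs <;> simp [PySem.Dict.getD_empty]

theorem pv_countLabels_append (classes : List Int) (labels : List Int) (lab : Int) :
    pvCountLabels classes (labels ++ [lab])
      = (pvCountLabels classes labels).insert lab ((pvCountLabels classes labels).getD lab 0 + 1) := by
  simp [pvCountLabels, List.foldl_append]

-- one step of A, applied to the reshaped state, is the reshape of one grouping step
theorem pv_step (attributeIndex attCount : Int) (classes : List Int)
    (g : PySem.Dict Int (List Int)) (inst : List Int) :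
    pvStepA attributeIndex attCount classes (pvReshape classes g, pvCnt g) inst
      = (pvReshape classes
           (g.insert (PySem.List.pyGetD inst attributeIndex 0)
             (g.getD (PySem.List.pyGetD inst attributeIndex 0) [] ++ [PySem.List.pyGetD inst attCount 0])),
         pvCnt
           (g.insert (PySem.List.pyGetD inst attributeIndex 0)
             (g.getD (PySem.List.pyGetD inst attributeIndex 0) [] ++ [PySem.List.pyGetD inst attCount 0]))) := by
  simp only [pvStepA]
  generalize PySem.List.pyGetD inst attributeIndex 0 = a
  generalize PySem.List.pyGetD inst attCount 0 = lab
  by_cases hc : g.contains a = true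
  · -- seen key: A updates in place; grouping replaces the value at a
    have hres : (pvReshape classes g).contains a = true := by
      rw [pvReshape, pv_contains_mapVals]; exact hc
    have hcnt : (pvCnt g).contains a = true := by
      rw [pvCnt, pv_contains_mapVals]; exact hc
    have hget : g.get? a = some (g.getD a []) := by
      rw [PySem.Dict.contains_eq_isSome_get?] at hc
      cases h : g.get? a with
      | none => rw [h] at hc; simp at hc
      | some v => simp [PySem.Dict.getD_eq_get?_getD, h]
    have hgetRes : (pvReshape classes g).getD a PySem.Dict.empty = pvCountLabels classes (g.getD a []) := by
      rw [PySem.Dict.getD_eq_get?_getD, pvReshape]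
      cases g with | mk items => rw [pv_get?_mapVals, hget]; rfl
    have hgetCnt : (pvCnt g).getD a 0 = PySem.List.len (g.getD a []) := by
      rw [PySem.Dict.getD_eq_get?_getD, pvCnt]
      cases g with | mk items => rw [pv_get?_mapVals, hget]; rfl
    have hd' : (if (pvCountLabels classes (g.getD a [])).contains lab = false then
          (pvCountLabels classes (g.getD a [])).insert lab 1
        else (pvCountLabels classes (g.getD a [])).insert lab
          ((pvCountLabels classes (g.getD a [])).getD lab 0 + 1))
        = pvCountLabels classes (g.getD a [] ++ [lab]) := by
      rw [pv_countLabels_append]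
      by_cases h : (pvCountLabels classes (g.getD a [])).contains lab = false
      · rw [if_pos h, PySem.Dict.getD_of_not_contains _ _ h]; norm_num
      · rw [if_neg h]
    rw [if_neg (by simp [hres] : ¬ ((pvReshape classes g).contains a = false))]
    rw [hgetRes, hgetCnt, hd', Prod.mk.injEq]
    constructor
    · -- attDict side
      apply PySem.Dict.ext
      rw [PySem.Dict.items_insert_of_contains _ _ hres]
      conv_rhs => rw [pvReshape, PySem.Dict.items_insert_of_contains _ _ hc]
      rw [pvReshape]
      cases g with | mk items =>
      simp only [List.map_map]
      apply List.map_congr_left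
      intro p hp
      obtain ⟨k1, v1⟩ := p
      by_cases hpa : (k1 == a) = true
      · simp [Function.comp, hpa]
      · simp [Function.comp, hpa]
    · -- countDict side
      apply PySem.Dict.ext
      rw [PySem.Dict.items_insert_of_contains _ _ hcnt]
      conv_rhs => rw [pvCnt, PySem.Dict.items_insert_of_contains _ _ hc]
      rw [pvCnt]
      cases g with | mk items =>
      simp only [List.map_map]
      apply List.map_congr_left
      intro p hp
      obtain ⟨k1, v1⟩ := p
      by_cases hpa : (k1 == a) = true
      · simp [Function.comp, hpa, PySem.List.len_eq]
      · simp [Function.comp, hpa]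
  · -- new key: A seeds; grouping appends (a, [lab])
    have hc' : g.contains a = false := by simpa using hc
    have hres : (pvReshape classes g).contains a = false := by
      rw [pvReshape, pv_contains_mapVals]; exact hc'
    have hcnt : (pvCnt g).contains a = false := by
      rw [pvCnt, pv_contains_mapVals]; exact hc'
    have hgd : g.getD a [] = [] := PySem.Dict.getD_of_not_contains _ _ hc'
    have hone : pvCountLabels classes ([lab])
        = ((PySem.Dict.empty.insert (PySem.List.pyGetD classes 0 0) (0 : Int)).insert
            (PySem.List.pyGetD classes 1 0) 0).insert lab 1 := by
      simp only [pvCountLabels, List.foldl_cons, List.foldl_nil]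
      rw [pv_seed_getD]
      norm_num
    rw [if_pos hres, Prod.mk.injEq]
    constructor
    · apply PySem.Dict.ext
      rw [PySem.Dict.items_insert_of_not_contains _ _ hres]
      conv_rhs => rw [pvReshape, PySem.Dict.items_insert_of_not_contains _ _ hc']
      rw [pvReshape, hgd]
      simp [hone]
    · apply PySem.Dict.ext
      rw [PySem.Dict.items_insert_of_not_contains _ _ hcnt]
      conv_rhs => rw [pvCnt, PySem.Dict.items_insert_of_not_contains _ _ hc']
      rw [pvCnt, hgd]
      simp

-- A's whole loop equals reshape-of-groups, by induction from the right
theorem pv_invariant (attributeIndex attCount : Int) (classes : List Int) (l : List (List Int)) :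
    l.foldl (pvStepA attributeIndex attCount classes) (PySem.Dict.empty, PySem.Dict.empty)
      = (pvReshape classes (l.foldl
          (fun (g : PySem.Dict Int (List Int)) inst =>
            g.insert (PySem.List.pyGetD inst attributeIndex 0)
              (g.getD (PySem.List.pyGetD inst attributeIndex 0) [] ++ [PySem.List.pyGetD inst attCount 0]))
          PySem.Dict.empty),
         pvCnt (l.foldl
          (fun (g : PySem.Dict Int (List Int)) inst =>
            g.insert (PySem.List.pyGetD inst attributeIndex 0)
              (g.getD (PySem.List.pyGetD inst attributeIndex 0) [] ++ [PySem.List.pyGetD inst attCount 0]))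
          PySem.Dict.empty)) := by
  induction l using List.reverseRecOn with
  | nil => rfl
  | append_singleton xs x ih =>
      rw [List.foldl_append, List.foldl_append, ih]
      simp only [List.foldl_cons, List.foldl_nil]
      exact pv_step attributeIndex attCount classes _ x

-- B's phase 2 over the group items builds exactly (pvReshape, pvCnt)
theorem pv_phase2 (classes : List Int) (g : PySem.Dict Int (List Int)) (hnd : g.keys.Nodup) :
    g.items.foldl
      (fun (st : PySem.Dict Int (PySem.Dict Int Int) × PySem.Dict Int Int) p =>
        (st.1.insert p.1 (pvCountLabels classes p.2), st.2.insert p.1 (PySem.List.len p.2)))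
      (PySem.Dict.empty, PySem.Dict.empty)
      = (pvReshape classes g, pvCnt g) := by
  rw [PySem.List.foldl_prod_mk
    (fun (d : PySem.Dict Int (PySem.Dict Int Int)) (p : Int × List Int) => d.insert p.1 (pvCountLabels classes p.2))
    (fun (d : PySem.Dict Int Int) (p : Int × List Int) => d.insert p.1 (PySem.List.len p.2))
    g.items PySem.Dict.empty PySem.Dict.empty, Prod.mk.injEq]
  have hkeys : (g.items.map (fun p => p.1)).Nodup := hnd
  constructor
  · apply PySem.Dict.ext
    rw [PySem.Dict.items_foldl_insert_fresh g.items (fun p => p.1) _ _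
      (fun p _ => PySem.Dict.contains_empty p.1) hkeys]
    simp [pvReshape, PySem.Dict.empty]
  · apply PySem.Dict.ext
    rw [PySem.Dict.items_foldl_insert_fresh g.items (fun p => p.1) _ _
      (fun p _ => PySem.Dict.contains_empty p.1) hkeys]
    simp [pvCnt, PySem.Dict.empty]

-- ===== VERDICT (by name: the statement is the Claim_ definition above) =====
theorem getSubData_spec : Claim_equal_getSubData := by
  intro attributeIndex data classes _ _
  unfold Spec_getSubData
  show getSubData attributeIndex data classes = getSubData_alt attributeIndex data classes
  have hA : getSubData attributeIndex data classes =
      ((data.foldl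
          (pvStepA attributeIndex (PySem.List.len (PySem.List.pyGetD data 0 []) - 1) classes)
          (PySem.Dict.empty, PySem.Dict.empty)).1.items.map (fun p => (p.1, p.2.items)),
       (data.foldl
          (pvStepA attributeIndex (PySem.List.len (PySem.List.pyGetD data 0 []) - 1) classes)
          (PySem.Dict.empty, PySem.Dict.empty)).2.items) := rfl
  have hB : getSubData_alt attributeIndex data classes =
      (((data.foldl
          (fun (g : PySem.Dict Int (List Int)) inst =>
            g.insert (PySem.List.pyGetD inst attributeIndex 0)
              (g.getD (PySem.List.pyGetD inst attributeIndex 0) []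
                ++ [PySem.List.pyGetD inst (PySem.List.len (PySem.List.pyGetD data 0 []) - 1) 0]))
          PySem.Dict.empty).items.foldl
          (fun (st : PySem.Dict Int (PySem.Dict Int Int) × PySem.Dict Int Int) p =>
            (st.1.insert p.1 (pvCountLabels classes p.2), st.2.insert p.1 (PySem.List.len p.2)))
          (PySem.Dict.empty, PySem.Dict.empty)).1.items.map (fun p => (p.1, p.2.items)),
       ((data.foldl
          (fun (g : PySem.Dict Int (List Int)) inst =>
            g.insert (PySem.List.pyGetD inst attributeIndex 0)
              (g.getD (PySem.List.pyGetD inst attributeIndex 0) []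
                ++ [PySem.List.pyGetD inst (PySem.List.len (PySem.List.pyGetD data 0 []) - 1) 0]))
          PySem.Dict.empty).items.foldl
          (fun (st : PySem.Dict Int (PySem.Dict Int Int) × PySem.Dict Int Int) p =>
            (st.1.insert p.1 (pvCountLabels classes p.2), st.2.insert p.1 (PySem.List.len p.2)))
          (PySem.Dict.empty, PySem.Dict.empty)).2.items) := rfl
  have hnd : (data.foldl
      (fun (g : PySem.Dict Int (List Int)) inst =>
        g.insert (PySem.List.pyGetD inst attributeIndex 0)
          (g.getD (PySem.List.pyGetD inst attributeIndex 0) []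
            ++ [PySem.List.pyGetD inst (PySem.List.len (PySem.List.pyGetD data 0 []) - 1) 0]))
      PySem.Dict.empty).keys.Nodup :=
    PySem.Dict.nodup_keys_foldl_insert_key data
      (fun inst => PySem.List.pyGetD inst attributeIndex 0) _ _ (by simp [PySem.Dict.keys_empty])
  rw [hA, hB,
    pv_invariant attributeIndex (PySem.List.len (PySem.List.pyGetD data 0 []) - 1) classes data,
    pv_phase2 classes _ hnd]
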